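-- pv_equiv track=rewrite | github.com/KavyaSnigdha/AmazonPreviousProblems | sumAfterNthIteration.py | NthIterationSum
-- ===== SOURCE A (Python) =====
-- def NthIterationSum(Arr):
--     k=[]
--     while len(Arr)>2:
--
--         for i in range(len(Arr)-1):
--             k.append(Arr[i]-Arr[i+1])
--
--         Arr=k
--
--         k=[]
--     return sum(Arr)
-- ===== SOURCE B (Python) =====
-- def NthIterationSum(Arr):
--     # Closed form: the final pair after the difference reductions is a signed
--     # binomial transform, so the answer is sum((-1)^j * C(m,j) * (Arr[j]+Arr[j+1]))
--     # with m = len(Arr)-2, computed in one O(n) pass.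
--     n = len(Arr)
--     if n <= 2:
--         return sum(Arr)
--     m = n - 2
--     total = 0
--     c = 1  # running binomial coefficient C(m, j)
--     sign = 1
--     for j in range(m + 1):
--         total += sign * c * (Arr[j] + Arr[j + 1])
--         c = c * (m - j) // (j + 1)
--         sign = -sign
--     return total
-- ===== Notes on version B (the rewrite author's own statement) =====
-- stated objective: faster
-- what changed: Replaces the repeated consecutive-difference reduction loop (rebuilding ever-shorter lists until length 2) by the closed-form signed binomial transform of the final pair, computed in a single pass with an incrementally updated binomial coefficient.
import Mathlib
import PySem

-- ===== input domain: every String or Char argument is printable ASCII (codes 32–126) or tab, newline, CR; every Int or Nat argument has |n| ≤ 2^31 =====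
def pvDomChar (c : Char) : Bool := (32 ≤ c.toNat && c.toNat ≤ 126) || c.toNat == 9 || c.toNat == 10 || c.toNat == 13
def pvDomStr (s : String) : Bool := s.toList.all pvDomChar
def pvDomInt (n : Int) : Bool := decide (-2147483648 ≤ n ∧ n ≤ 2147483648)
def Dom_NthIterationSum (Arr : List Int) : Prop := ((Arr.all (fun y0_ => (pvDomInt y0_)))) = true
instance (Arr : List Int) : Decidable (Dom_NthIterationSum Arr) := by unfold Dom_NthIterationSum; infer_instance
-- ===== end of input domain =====

-- B replaces A's quadratic repeated difference-reduction loop by the closed-form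
-- signed binomial transform of the final pair, computed in a single O(n) pass.

-- ===== PORT A =====
-- the body of A's while loop: k = [Arr[i] - Arr[i+1] for i in range(len(Arr)-1)] (built by append)
def pvStepA (Arr : List Int) : List Int :=
  (PySem.List.pyRange 0 ((Arr.length : Int) - 1) 1).foldl
    (fun k i => k ++ [PySem.List.pyGetD Arr i 0 - PySem.List.pyGetD Arr (i + 1) 0]) []

-- needed by the port's termination: each pass shortens the list by one
theorem pvStepA_length (Arr : List Int) : (pvStepA Arr).length = Arr.length - 1 := by
  unfold pvStepA
  rw [PySem.List.foldl_append_singleton_eq_map, List.nil_append, List.length_map,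
      PySem.List.length_pyRange_one]
  omega

def NthIterationSum (Arr : List Int) : Int :=
  if Arr.length > 2 then NthIterationSum (pvStepA Arr) else Arr.sum
termination_by Arr.length
decreasing_by rw [pvStepA_length]; omega

-- ===== PORT B =====
def NthIterationSum_alt (Arr : List Int) : Int :=
  let n : Int := Arr.length
  if n ≤ 2 then Arr.sum
  else
    let m : Int := n - 2
    -- state (total, c, sign); c = c * (m - j) // (j + 1) is Python's floor division
    let st := (PySem.List.pyRange 0 (m + 1) 1).foldl
      (fun (s : Int × Int × Int) j =>
        (s.1 + s.2.2 * s.2.1 * (PySem.List.pyGetD Arr j 0 + PySem.List.pyGetD Arr (j + 1) 0),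
         PySem.Int.floordiv (s.2.1 * (m - j)) (j + 1),
         -s.2.2)) (0, 1, 1)
    st.1

-- ===== PRECONDITION & SPEC =====
def Spec_NthIterationSum (Arr : List Int) (out : Int) : Prop := out = NthIterationSum_alt Arr
instance (Arr : List Int) (out : Int) : Decidable (Spec_NthIterationSum Arr out) := by unfold Spec_NthIterationSum; infer_instance

-- ===== CLAIM (what is proved, stated in full; the proofs are below) =====
def Claim_equal_NthIterationSum : Prop := ∀ (Arr : List Int), Dom_NthIterationSum Arr → Spec_NthIterationSum Arr (NthIterationSum Arr)

-- ===== LEMMAS AND PROOFS =====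

-- the closed-form value: ∑_{j≤m} (-1)^j C(m,j) (a_j + a_{j+1})
def pvS (m : Nat) (a : List Int) : Int :=
  ∑ j ∈ Finset.range (m + 1), (-1 : Int) ^ j * (m.choose j : Int) * (a.getD j 0 + a.getD (j + 1) 0)

theorem pvStepA_eq (a : List Int) :
    pvStepA a = (List.range (a.length - 1)).map (fun i => a.getD i 0 - a.getD (i + 1) 0) := by
  unfold pvStepA
  rw [PySem.List.foldl_append_singleton_eq_map, List.nil_append, PySem.List.pyRange_one]
  have h : ((a.length : Int) - 1 - 0).toNat = a.length - 1 := by omega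
  rw [h, List.map_map]
  refine List.map_congr_left (fun k _ => ?_)
  simp only [Function.comp, zero_add]
  rw [show (k : Int) + 1 = ((k + 1 : Nat) : Int) from by push_cast; ring,
      PySem.List.pyGetD_natCast, PySem.List.pyGetD_natCast]

theorem pvStepA_getD (a : List Int) (j : Nat) (hj : j < a.length - 1) :
    (pvStepA a).getD j 0 = a.getD j 0 - a.getD (j + 1) 0 := by
  rw [pvStepA_eq, PySem.List.getD_map_range _ _ _ _ hj]

-- Pascal's rule: the order-(m+1) signed binomial sum of t is the order-m sum of its differences
theorem pv_pascal (m : Nat) (t : Nat → Int) :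
    ∑ j ∈ Finset.range (m + 1 + 1), (-1 : Int) ^ j * ((m + 1).choose j : Int) * t j
    = ∑ j ∈ Finset.range (m + 1), (-1 : Int) ^ j * (m.choose j : Int) * (t j - t (j + 1)) := by
  have hP : ∑ j ∈ Finset.range (m + 1), (-1 : Int) ^ j * (m.choose (j + 1) : Int) * t (j + 1)
      = t 0 - ∑ j ∈ Finset.range (m + 1), (-1 : Int) ^ j * (m.choose j : Int) * t j := by
    rw [Finset.sum_range_succ, Nat.choose_succ_self,
        Finset.sum_range_succ' (fun j => (-1 : Int) ^ j * (m.choose j : Int) * t j) m]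
    simp only [Nat.choose_zero_right, pow_zero, Nat.cast_one, Nat.cast_zero]
    rw [show ∑ j ∈ Finset.range m, (-1 : Int) ^ (j + 1) * (m.choose (j + 1) : Int) * t (j + 1)
        = -∑ j ∈ Finset.range m, (-1 : Int) ^ j * (m.choose (j + 1) : Int) * t (j + 1) from by
      rw [← Finset.sum_neg_distrib]; exact Finset.sum_congr rfl fun j _ => by ring]
    ring
  rw [Finset.sum_range_succ' (fun j => (-1 : Int) ^ j * ((m + 1).choose j : Int) * t j) (m + 1)]
  simp only [Nat.choose_succ_succ, Nat.choose_zero_right, pow_zero, Nat.cast_one, Nat.cast_add]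
  rw [show ∑ j ∈ Finset.range (m + 1),
        (-1 : Int) ^ (j + 1) * ((m.choose j : Int) + (m.choose (j + 1) : Int)) * t (j + 1)
      = -∑ j ∈ Finset.range (m + 1), ((-1 : Int) ^ j * (m.choose j : Int) * t (j + 1)
          + (-1 : Int) ^ j * (m.choose (j + 1) : Int) * t (j + 1)) from by
    rw [← Finset.sum_neg_distrib]; exact Finset.sum_congr rfl fun j _ => by ring]
  rw [Finset.sum_add_distrib, hP]
  rw [show ∑ j ∈ Finset.range (m + 1), (-1 : Int) ^ j * (m.choose j : Int) * (t j - t (j + 1))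
      = ∑ j ∈ Finset.range (m + 1), ((-1 : Int) ^ j * (m.choose j : Int) * t j
          - (-1 : Int) ^ j * (m.choose j : Int) * t (j + 1)) from
    Finset.sum_congr rfl fun j _ => by ring]
  rw [Finset.sum_sub_distrib]
  ring

-- one difference pass lowers the binomial order by one
theorem pvS_step (m : Nat) (a : List Int) (h : m + 3 ≤ a.length) :
    pvS (m + 1) a = pvS m (pvStepA a) := by
  unfold pvS
  rw [pv_pascal m (fun j => a.getD j 0 + a.getD (j + 1) 0)]
  refine Finset.sum_congr rfl (fun j hj => ?_)
  have hj' : j < m + 1 := Finset.mem_range.mp hj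
  rw [pvStepA_getD a j (by omega), pvStepA_getD a (j + 1) (by omega)]
  ring

-- A's while loop computes the closed form
theorem pvA_eq_S (m : Nat) : ∀ a : List Int, a.length = m + 2 → NthIterationSum a = pvS m a := by
  induction m with
  | zero =>
    intro a ha
    obtain ⟨x, y, rfl⟩ := List.length_eq_two.mp ha
    rw [NthIterationSum]
    simp [pvS]
  | succ m ih =>
    intro a ha
    rw [NthIterationSum, if_pos (by omega), ih (pvStepA a) (by rw [pvStepA_length]; omega)]
    exact (pvS_step m a (by omega)).symm

-- B's loop invariant: after the first r iterations the state is
-- (partial closed-form sum, C(m,r), (-1)^r)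
theorem pvB_inv (a : List Int) (m : Nat) : ∀ r : Nat, r ≤ m + 1 →
    (PySem.List.pyRange 0 (r : Int) 1).foldl
      (fun (s : Int × Int × Int) j =>
        (s.1 + s.2.2 * s.2.1 * (PySem.List.pyGetD a j 0 + PySem.List.pyGetD a (j + 1) 0),
         PySem.Int.floordiv (s.2.1 * ((m : Int) - j)) (j + 1),
         -s.2.2)) (0, 1, 1)
    = (∑ j ∈ Finset.range r, (-1 : Int) ^ j * (m.choose j : Int) * (a.getD j 0 + a.getD (j + 1) 0),
       (m.choose r : Int), (-1 : Int) ^ r) := by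
  intro r
  induction r with
  | zero => intro _; simp [PySem.List.pyRange_one_eq_nil]
  | succ r ih =>
    intro hr
    rw [show ((r + 1 : Nat) : Int) = (r : Int) + 1 from by push_cast; ring,
        PySem.List.pyRange_one_succ_right (by positivity),
        List.foldl_append, ih (by omega), List.foldl_cons, List.foldl_nil]
    refine Prod.ext ?_ (Prod.ext ?_ ?_)
    · simp only [Finset.sum_range_succ]
      rw [show ((r : Int) + 1) = ((r + 1 : Nat) : Int) from by push_cast; ring,
          PySem.List.pyGetD_natCast, PySem.List.pyGetD_natCast]
    · simp only
      have hchoose : (m.choose r : Int) * ((m : Int) - (r : Int))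
          = (m.choose (r + 1) : Int) * ((r : Int) + 1) := by
        have hkey := Nat.choose_succ_right_eq m r
        have hsub : ((m - r : Nat) : Int) = (m : Int) - (r : Int) := by omega
        calc (m.choose r : Int) * ((m : Int) - (r : Int))
            = ((m.choose r * (m - r) : Nat) : Int) := by push_cast [hsub]; ring
          _ = ((m.choose (r + 1) * (r + 1) : Nat) : Int) := by rw [← hkey]
          _ = (m.choose (r + 1) : Int) * ((r : Int) + 1) := by push_cast; ring
      rw [hchoose, PySem.Int.floordiv_eq_ediv_of_pos (by omega),
          Int.mul_ediv_cancel _ (by omega)]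
    · simp [pow_succ]

-- B computes the closed form
theorem pvB_eq_S (a : List Int) (m : Nat) (hm : a.length = m + 2) (h3 : 3 ≤ a.length) :
    NthIterationSum_alt a = pvS m a := by
  unfold NthIterationSum_alt
  rw [if_neg (by omega)]
  have hmint : (a.length : Int) - 2 = (m : Int) := by omega
  simp only [hmint]
  rw [show (m : Int) + 1 = ((m + 1 : Nat) : Int) from by push_cast; ring,
      pvB_inv a m (m + 1) (le_refl _)]
  rfl

-- ===== VERDICT (by name: the statement is the Claim_ definition above) =====
theorem NthIterationSum_spec : Claim_equal_NthIterationSum := by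
  intro Arr _
  unfold Spec_NthIterationSum
  by_cases h : Arr.length ≤ 2
  · rw [NthIterationSum, if_neg (by omega)]
    unfold NthIterationSum_alt
    rw [if_pos (by omega)]
  · have hm : Arr.length = (Arr.length - 2) + 2 := by omega
    rw [pvA_eq_S (Arr.length - 2) Arr hm, pvB_eq_S Arr (Arr.length - 2) hm (by omega)]
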